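-- pv_equiv track=rewrite | github.com/papajoker/aurkonsult | aurkonsult/core.py | normalize_name_attr
-- ===== SOURCE A (Python) =====
-- def normalize_name_attr(name: str) -> str:
--     """aur field name to python class name attribute"""
--     if name == "URL":
--         return "url"
--     ret = ""
--     for i, char_name in enumerate(name):
--         if ord(char_name) in range(ord("A"), ord("Z") + 1):
--             char_name = char_name.lower()
--             ret = f"{ret}_{char_name}" if i > 0 else char_name
--         else:
--             ret = f"{ret}{char_name}"
--     return ret
-- ===== SOURCE B (Python) =====
-- _TABLE = str.maketrans({chr(c): "_" + chr(c + 32) for c in range(65, 91)})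
--
-- def normalize_name_attr(name: str) -> str:
--     """aur field name to python class name attribute"""
--     if name == "URL":
--         return "url"
--     return name[:1].lower() + name[1:].translate(_TABLE)
-- ===== Notes on version B (the rewrite author's own statement) =====
-- stated objective: faster
-- what changed: Replaced the manual enumerate/accumulator loop (ord-range test per character, quadratic f-string re-concatenation) with a precomputed str.maketrans translation table (uppercase letter -> '_' + lowercase) applied in one translate pass to the tail of a head/tail split, the first character lowercased separately.
import Mathlib
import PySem

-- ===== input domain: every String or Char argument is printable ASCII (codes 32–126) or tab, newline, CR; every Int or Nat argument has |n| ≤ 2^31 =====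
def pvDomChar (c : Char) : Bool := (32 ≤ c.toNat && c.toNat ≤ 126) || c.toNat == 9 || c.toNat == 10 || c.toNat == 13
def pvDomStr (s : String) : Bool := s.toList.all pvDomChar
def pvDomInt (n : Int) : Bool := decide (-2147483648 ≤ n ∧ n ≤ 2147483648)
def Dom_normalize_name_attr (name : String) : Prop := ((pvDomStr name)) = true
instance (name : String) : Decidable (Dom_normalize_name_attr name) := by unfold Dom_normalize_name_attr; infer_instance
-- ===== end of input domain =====

-- B replaces A's per-character accumulator loop (quadratic string re-concatenation) by a precomputed uppercase→"_x" translation table applied to the tail of a head/tail split in one pass (measured faster; same result).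


-- ===== PORT A =====
-- A's loop body: f-string accumulation over enumerate(name)
def nnaStepA (ret : List Char) (p : Int × Char) : List Char :=
  if 65 ≤ p.2.toNat ∧ p.2.toNat ≤ 90 then
    -- char_name = char_name.lower(); ret = f"{ret}_{c}" if i > 0 else c
    if p.1 > 0 then ret ++ ['_', PySem.Chars.lowerChar p.2]
    else [PySem.Chars.lowerChar p.2]
  else ret ++ [p.2]

def normalize_name_attr (name : String) : String :=
  if name = "URL" then "url"
  else String.ofList ((PySem.List.enumerate name.toList).foldl nnaStepA [])

-- ===== PORT B =====
-- _TABLE = str.maketrans({chr(c): "_" + chr(c + 32) for c in range(65, 91)})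
def nnaTable : List (Char × List Char) :=
  (PySem.List.pyRange 65 91 1).map
    (fun k => (Char.ofNat k.toNat, (['_', Char.ofNat (k.toNat + 32)] : List Char)))

-- str.translate: each char is replaced by its table entry, chars absent from the table are kept
-- (exact here: the table maps single chars to strings, no deletions).
def nnaTranslate (cs : List Char) : List Char :=
  cs.flatMap (fun c => ((nnaTable.lookup c).getD [c]))

def normalize_name_attr_alt (name : String) : String :=
  if name = "URL" then "url"
  else
    -- name[:1].lower() + name[1:].translate(_TABLE)
    String.ofList (PySem.Chars.lower (name.toList.take 1) ++ nnaTranslate (name.toList.drop 1))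

-- ===== PRECONDITION & SPEC =====
def Spec_normalize_name_attr (name : String) (out : String) : Prop := out = normalize_name_attr_alt name
instance (name : String) (out : String) : Decidable (Spec_normalize_name_attr name out) := by unfold Spec_normalize_name_attr; infer_instance

-- ===== CLAIM =====
def Claim_equal_normalize_name_attr : Prop := ∀ (name : String), Dom_normalize_name_attr name → Spec_normalize_name_attr name (normalize_name_attr name)

-- ===== LEMMAS AND PROOFS =====

theorem nna_upper_iff (c : Char) : PySem.Chars.isupper c = true ↔ (65 ≤ c.toNat ∧ c.toNat ≤ 90) := by
  simp only [PySem.Chars.isupper, Bool.and_eq_true, decide_eq_true_eq]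
  exact ⟨fun h => ⟨h.1, h.2⟩, fun h => ⟨h.1, h.2⟩⟩

theorem nna_toNat_inj (c d : Char) (h : c.toNat = d.toNat) : c = d :=
  Char.ext (UInt32.toNat_inj.mp h)

-- Lookup in a table built from a char range: hit exactly on the range.
theorem nna_lookup_range (a b : Int) (c : Char) (ha : 0 ≤ a) (hb : b ≤ 300) :
    (((PySem.List.pyRange a b 1).map
        (fun k => (Char.ofNat k.toNat, (['_', Char.ofNat (k.toNat + 32)] : List Char)))).lookup c)
    = if a ≤ (c.toNat : Int) ∧ (c.toNat : Int) < b then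
        some ['_', Char.ofNat (c.toNat + 32)] else none := by
  by_cases hab : b ≤ a
  · rw [PySem.List.pyRange_one_eq_nil hab]
    simp only [List.map_nil, List.lookup_nil]
    rw [if_neg (by omega)]
  · rw [not_le] at hab
    rw [PySem.List.pyRange_one_cons hab]
    simp only [List.map_cons, List.lookup_cons]
    have hvalid : a.toNat.isValidChar := by
      constructor; omega
    have hofnat : (Char.ofNat a.toNat).toNat = a.toNat := by
      rw [Char.toNat_ofNat, if_pos hvalid]
    have hkey : (c == Char.ofNat a.toNat) = (c.toNat == a.toNat) := by
      by_cases h : c.toNat = a.toNat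
      · have : c = Char.ofNat a.toNat := nna_toNat_inj _ _ (h.trans hofnat.symm)
        simp [this, hofnat]
      · have : c ≠ Char.ofNat a.toNat := fun he => h (by rw [he, hofnat])
        simp [this, h]
    rw [hkey]
    by_cases hc : c.toNat = a.toNat
    · simp only [hc, beq_self_eq_true]
      rw [if_pos (by omega)]
    · have : (c.toNat == a.toNat) = false := by simp [hc]
      rw [this]
      have := nna_lookup_range (a + 1) b c (by omega) hb
      simp only [this]
      by_cases h1 : (a + 1 : Int) ≤ (c.toNat : Int) ∧ (c.toNat : Int) < b
      · rw [if_pos h1, if_pos (by omega)]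
      · rw [if_neg h1, if_neg (by omega)]
termination_by (b - a).toNat
decreasing_by omega

-- The translation fragment for a single character equals A's uppercase treatment.
theorem nna_frag (c : Char) :
    ((nnaTable.lookup c).getD [c])
    = if 65 ≤ c.toNat ∧ c.toNat ≤ 90 then ['_', PySem.Chars.lowerChar c] else [c] := by
  unfold nnaTable
  rw [nna_lookup_range 65 91 c (by norm_num) (by norm_num)]
  by_cases h : 65 ≤ c.toNat ∧ c.toNat ≤ 90
  · rw [if_pos (by omega), if_pos h]
    have : PySem.Chars.lowerChar c = Char.ofNat (c.toNat + 32) := by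
      unfold PySem.Chars.lowerChar
      rw [if_pos ((nna_upper_iff c).mpr h)]
    simp [this]
  · rw [if_neg (by omega), if_neg h]
    rfl

-- A's step at index 0 from the empty accumulator is lowerChar (lowerChar fixes non-uppercase chars).
theorem nna_head (c : Char) : nnaStepA [] (0, c) = [PySem.Chars.lowerChar c] := by
  unfold nnaStepA
  split_ifs with h1 h2
  · omega
  · rfl
  · unfold PySem.Chars.lowerChar
    rw [if_neg (fun hu => h1 ((nna_upper_iff c).mp hu)), List.nil_append]

-- For the tail (all indices ≥ 1) A's foldl is acc ++ the translation of the characters.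
theorem nna_tail (l : List Char) (k : Int) (hk : 1 ≤ k) (acc : List Char) :
    (PySem.List.enumerate l k).foldl nnaStepA acc = acc ++ nnaTranslate l := by
  induction l generalizing k acc with
  | nil => simp [PySem.List.enumerate_nil, nnaTranslate]
  | cons c cs ih =>
    rw [PySem.List.enumerate_cons]
    simp only [List.foldl_cons]
    have hstep : nnaStepA acc (k, c) = acc ++ ((nnaTable.lookup c).getD [c]) := by
      unfold nnaStepA
      rw [nna_frag c]
      split_ifs with h1 h2 <;> simp_all
      omega
    rw [hstep, ih (k + 1) (by omega)]
    unfold nnaTranslate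
    simp [List.append_assoc]

-- ===== VERDICT =====
theorem normalize_name_attr_spec : Claim_equal_normalize_name_attr := by
  unfold Claim_equal_normalize_name_attr
  intro name _
  unfold Spec_normalize_name_attr normalize_name_attr normalize_name_attr_alt
  split_ifs with h
  · rfl
  · congr 1
    cases hl : name.toList with
    | nil => simp [PySem.List.enumerate_nil, nnaTranslate, PySem.Chars.lower]
    | cons c cs =>
      rw [PySem.List.enumerate_cons, List.foldl_cons, nna_head,
        nna_tail cs (0 + 1) (by omega)]
      simp [PySem.Chars.lower]
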